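-- pv_equiv track=rewrite | github.com/prudentprogrammer/Programming-Challenges-Solutions | uriProblems/Strings/2694 - Problem with the Calculator.py | get_nums_from_word
-- ===== SOURCE A (Python) =====
-- def get_nums_from_word(word):
--   curr_num = 0
--   res = []
--   for char in word:
--     if char.isdigit():
--       curr_num = curr_num * 10 + int(char)
--     else:
--       if curr_num != 0:
--         res.append(curr_num)
--       curr_num = 0
--
--   if curr_num != 0:
--     res.append(curr_num)
--   return res
-- ===== SOURCE B (Python) =====
-- from itertools import groupby
--
-- def get_nums_from_word(word):
--     res = []
--     for is_digit, run in groupby(word, key=str.isdigit):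
--         if is_digit:
--             n = int(''.join(run))
--             if n != 0:
--                 res.append(n)
--     return res
-- ===== Notes on version B (the rewrite author's own statement) =====
-- stated objective: idiomatic
-- what changed: Replaces A's digit-by-digit accumulator state machine with an itertools.groupby run decomposition: split the string into maximal isdigit runs, int() each digit run, keep nonzero values.
import Mathlib
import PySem

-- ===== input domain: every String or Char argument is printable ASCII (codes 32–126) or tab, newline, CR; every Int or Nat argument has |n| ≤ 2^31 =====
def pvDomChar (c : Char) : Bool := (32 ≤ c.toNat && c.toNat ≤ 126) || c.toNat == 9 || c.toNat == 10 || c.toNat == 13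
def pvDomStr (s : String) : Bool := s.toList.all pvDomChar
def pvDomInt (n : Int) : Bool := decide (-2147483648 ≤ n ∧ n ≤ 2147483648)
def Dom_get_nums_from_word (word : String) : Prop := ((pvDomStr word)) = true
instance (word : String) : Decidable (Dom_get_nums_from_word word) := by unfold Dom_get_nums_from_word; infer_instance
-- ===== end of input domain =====

-- B replaces A's digit-by-digit state machine with a groupby-style run decomposition
-- (split into maximal digit runs, convert each run, keep the nonzero values); idiomatic, same cost.

-- ===== PORT A =====
-- the loop body of A: state (curr_num, res); int(char) on a digit is its code minus 48 (exact on Dom)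
def pvGoA : List Char → Int → List Int → List Int
  | [], curr, res => if curr ≠ 0 then res ++ [curr] else res
  | c :: cs, curr, res =>
    if PySem.Chars.isdigit c then
      pvGoA cs (curr * 10 + ((c.toNat : Int) - 48)) res
    else
      pvGoA cs 0 (if curr ≠ 0 then res ++ [curr] else res)

def get_nums_from_word (word : String) : List Int := pvGoA word.toList 0 []

-- ===== PORT B =====
-- int(''.join(run)) on a (nonempty, all-digit) run — exact on Dom
def pvRunVal (run : List Char) : Int := run.foldl (fun a c => a * 10 + ((c.toNat : Int) - 48)) 0

-- groupby(word, key=str.isdigit): walk the maximal digit runs; keep nonzero values, skip non-digit groups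
def pvRunsB : List Char → List Int
  | [] => []
  | c :: cs =>
    if PySem.Chars.isdigit c then
      let n := pvRunVal ((c :: cs).takeWhile PySem.Chars.isdigit)
      (if n ≠ 0 then [n] else []) ++ pvRunsB ((c :: cs).dropWhile PySem.Chars.isdigit)
    else
      pvRunsB cs
  termination_by cs => cs.length
  decreasing_by
    · rename_i h
      rw [List.dropWhile_cons, if_pos h]
      have := List.length_dropWhile_le (p := PySem.Chars.isdigit) (l := cs)
      simpa using Nat.lt_succ_of_le this
    · simp

def get_nums_from_word_alt (word : String) : List Int := pvRunsB word.toList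

-- ===== PRECONDITION & SPEC =====
def Spec_get_nums_from_word (word : String) (out : List Int) : Prop := out = get_nums_from_word_alt word
instance (word : String) (out : List Int) : Decidable (Spec_get_nums_from_word word out) := by unfold Spec_get_nums_from_word; infer_instance

-- ===== CLAIM (what is proved, stated in full; the proofs are below) =====
def Claim_equal_get_nums_from_word : Prop := ∀ (word : String), Dom_get_nums_from_word word → Spec_get_nums_from_word word (get_nums_from_word word)

-- ===== LEMMAS AND PROOFS =====

-- appending to the accumulator commutes out of the loop
theorem pvGoA_append (cs : List Char) : ∀ (curr : Int) (res : List Int),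
    pvGoA cs curr res = res ++ pvGoA cs curr [] := by
  induction cs with
  | nil => intro curr res; simp [pvGoA]; split <;> simp
  | cons c cs ih =>
    intro curr res
    simp only [pvGoA]
    split
    · exact ih _ _
    · rw [ih _ (if curr ≠ 0 then res ++ [curr] else res), ih _ (if curr ≠ 0 then [] ++ [curr] else [])]
      split <;> simp
theorem pvGoA_digits (run : List Char) : ∀ (rest : List Char) (curr : Int) (res : List Int),
    (∀ c ∈ run, PySem.Chars.isdigit c = true) →
    pvGoA (run ++ rest) curr res
      = pvGoA rest (run.foldl (fun a c => a * 10 + ((c.toNat : Int) - 48)) curr) res := by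
  induction run with
  | nil => intro rest curr res _; simp
  | cons c run ih =>
    intro rest curr res h
    simp only [List.cons_append, pvGoA, h c (by simp), if_pos, List.foldl_cons]
    exact ih rest _ res (fun d hd => h d (by simp [hd]))

-- flushing a pending value at a boundary (end of string or a non-digit head)
theorem pvGoA_flush (rest : List Char) (v : Int)
    (h : rest = [] ∨ ∃ x xs, rest = x :: xs ∧ PySem.Chars.isdigit x = false) :
    pvGoA rest v [] = (if v ≠ 0 then [v] else []) ++ pvGoA rest 0 [] := by
  rcases h with h | ⟨x, xs, rfl, hx⟩
  · subst h; by_cases hv : v = 0 <;> simp [pvGoA, hv]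
  · simp only [pvGoA, hx, Bool.false_eq_true, ite_not, reduceIte]
    split
    · simp
    · rw [pvGoA_append xs 0 ([] ++ [v])]; simp

theorem pvGoA_eq_pvRunsB (cs : List Char) : pvGoA cs 0 [] = pvRunsB cs := by
  induction cs using pvRunsB.induct with
  | case1 => simp [pvGoA, pvRunsB]
  | case2 c cs hd ih =>
    have hsplit := List.takeWhile_append_dropWhile (p := PySem.Chars.isdigit) (l := c :: cs)
    have hrun : ∀ d ∈ (c :: cs).takeWhile PySem.Chars.isdigit, PySem.Chars.isdigit d = true :=
      fun d hd => List.mem_takeWhile_imp hd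
    have hbd : (c :: cs).dropWhile PySem.Chars.isdigit = [] ∨
        ∃ x xs, (c :: cs).dropWhile PySem.Chars.isdigit = x :: xs ∧ PySem.Chars.isdigit x = false := by
      rcases hds : (c :: cs).dropWhile PySem.Chars.isdigit with _ | ⟨x, xs⟩
      · exact Or.inl rfl
      · exact Or.inr ⟨x, xs, rfl, by
          have := List.head_dropWhile_not (p := PySem.Chars.isdigit) (l := c :: cs)
            (by simp [hds])
          simpa [hds] using this⟩
    calc pvGoA (c :: cs) 0 []
        = pvGoA ((c :: cs).takeWhile PySem.Chars.isdigit ++ (c :: cs).dropWhile PySem.Chars.isdigit) 0 [] := by rw [hsplit]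
      _ = pvGoA ((c :: cs).dropWhile PySem.Chars.isdigit) (pvRunVal ((c :: cs).takeWhile PySem.Chars.isdigit)) [] :=
          pvGoA_digits _ _ 0 [] hrun
      _ = (if pvRunVal ((c :: cs).takeWhile PySem.Chars.isdigit) ≠ 0
              then [pvRunVal ((c :: cs).takeWhile PySem.Chars.isdigit)] else [])
            ++ pvGoA ((c :: cs).dropWhile PySem.Chars.isdigit) 0 [] := pvGoA_flush _ _ hbd
      _ = pvRunsB (c :: cs) := by rw [ih]; simp [pvRunsB, hd]
  | case3 c cs hd ih =>
    simp only [pvGoA, hd, Bool.false_eq_true, ite_not, reduceIte]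
    simpa [pvRunsB, hd] using ih

-- ===== VERDICT (by name: the statement is the Claim_ definition above) =====
theorem get_nums_from_word_spec : Claim_equal_get_nums_from_word := by
  intro word _
  unfold Spec_get_nums_from_word get_nums_from_word get_nums_from_word_alt
  exact pvGoA_eq_pvRunsB word.toList
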